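-- pv_equiv track=rewrite | github.com/swarnabhK/dsa_helsinki | 3_EffecientAlgorithms/samechar.py | count
-- ===== SOURCE A (Python) =====
-- from collections import defaultdict
--
-- def count(s):
--     freq = defaultdict(int)
--     res,left = 0,0
--     for right in range(len(s)):
--         freq[s[right]]+=1
--         while(len(freq)>1):
--             freq[s[left]]-=1
--             if freq[s[left]]==0:
--                 del freq[s[left]]
--             left+=1
--         res+= right-left+1 #no of valid subarrays ending at right is the length of the subarray.
--     return res
-- ===== SOURCE B (Python) =====
-- def count(s):
--     total = 0
--     i = 0
--     n = len(s)
--     while i < n: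
--         j = i + 1
--         while j < n and s[j] == s[i]:
--             j += 1
--         k = j - i
--         total += k * (k + 1) // 2
--         i = j
--     return total
-- ===== Notes on version B (the rewrite author's own statement) =====
-- stated objective: simpler
-- what changed: Replaces the sliding window with a frequency defaultdict by a single scan over maximal runs of equal characters, adding k*(k+1)//2 per run of length k.
import Mathlib
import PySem

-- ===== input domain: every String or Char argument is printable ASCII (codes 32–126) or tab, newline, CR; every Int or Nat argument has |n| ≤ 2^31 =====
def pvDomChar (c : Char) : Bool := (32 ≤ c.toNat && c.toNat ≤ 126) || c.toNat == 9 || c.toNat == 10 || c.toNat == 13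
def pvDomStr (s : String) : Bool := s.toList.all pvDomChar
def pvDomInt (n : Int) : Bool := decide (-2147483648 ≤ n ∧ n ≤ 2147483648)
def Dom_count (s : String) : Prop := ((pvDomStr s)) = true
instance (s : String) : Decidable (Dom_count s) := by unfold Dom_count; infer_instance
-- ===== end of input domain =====

-- B replaces A's sliding window over a character-frequency defaultdict by a single scan
-- over maximal runs of equal characters, adding k*(k+1)//2 per run of length k (simpler).

-- ===== PORT A =====
-- the inner `while len(freq) > 1:` loop of A; fuel bounds the iterations (left moves
-- forward at most len(s) times), which is never exhausted on reachable states
def countShrink (cs : List Char) (freq : PySem.Dict Char Int) (left : Int) :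
    Nat → PySem.Dict Char Int × Int
  | 0 => (freq, left)
  | fuel + 1 =>
    if 1 < freq.size then
      match PySem.List.pyGet? cs left with
      | some c =>
          let f1 := freq.modify c 0 (· - 1)
          let f2 := if f1.getD c 0 == 0 then f1.erase c else f1
          countShrink cs f2 (left + 1) fuel
      | none => (freq, left)   -- unreachable: left always stays in range
    else (freq, left)

-- one iteration of A's `for right in range(len(s)):` body; state (freq, res, left)
def countStep (cs : List Char) (st : PySem.Dict Char Int × Int × Int) (p : Int × Char) :
    PySem.Dict Char Int × Int × Int :=
  let f1 := st.1.modify p.2 0 (· + 1)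
  let r := countShrink cs f1 st.2.2 cs.length
  (r.1, st.2.1 + p.1 - r.2 + 1, r.2)

def count (s : String) : Int :=
  ((PySem.List.enumerate s.toList).foldl (countStep s.toList) (PySem.Dict.empty, 0, 0)).2.1

-- ===== PORT B =====
-- Source B: scan maximal runs; the inner `while j < n and s[j] == s[i]` is the takeWhile,
-- continuing at j is the dropWhile
def countRuns : List Char → Int
  | [] => 0
  | c :: rest =>
      let k : Int := (rest.takeWhile (· == c)).length + 1
      PySem.Int.floordiv (k * (k + 1)) 2 + countRuns (rest.dropWhile (· == c))
termination_by l => l.length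
decreasing_by
  have := List.length_dropWhile_le (· == c) rest
  simp; omega

def count_alt (s : String) : Int := countRuns s.toList

-- ===== PRECONDITION & SPEC =====
def Spec_count (s : String) (out : Int) : Prop := out = count_alt s
instance (s : String) (out : Int) : Decidable (Spec_count s out) := by unfold Spec_count; infer_instance

-- ===== CLAIM (what is proved, stated in full; the proofs are below) =====
def Claim_equal_count : Prop := ∀ (s : String), Dom_count s → Spec_count s (count s)

-- ===== LEMMAS AND PROOFS =====

-- reference: forward tally of current-run lengths (what A's `res += right-left+1` sums)
def tally (c : Char) (k : Nat) : List Char → Int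
  | [] => 0
  | d :: rest => if d = c then ((k : Int) + 1) + tally c (k + 1) rest else 1 + tally d 1 rest

-- triangle number k*(k+1)//2
def tri (k : Nat) : Int := ((k * (k + 1) / 2 : Nat) : Int)

lemma tri_succ (k : Nat) : tri (k + 1) = tri k + (k + 1) := by
  unfold tri
  obtain ⟨m, hm⟩ := Nat.even_mul_succ_self k
  have h2 : (k + 1) * (k + 1 + 1) = k * (k + 1) + 2 * (k + 1) := by ring
  have hN : (k + 1) * (k + 1 + 1) / 2 = k * (k + 1) / 2 + (k + 1) := by omega
  rw [hN]
  push_cast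
  ring

lemma floordiv_tri (k : Nat) :
    PySem.Int.floordiv ((k : Int) * ((k : Int) + 1)) 2 = tri k := by
  have : (k : Int) * ((k : Int) + 1) = ((k * (k + 1) : Nat) : Int) := by push_cast; ring
  rw [this, tri]
  exact_mod_cast PySem.Int.floordiv_natCast (k * (k + 1)) 2

lemma takeWhile_replicate_append {c d : Char} (h : (d == c) = false) (k : Nat) (rest : List Char) :
    (List.replicate k c ++ d :: rest).takeWhile (· == c) = List.replicate k c := by
  induction k with
  | zero => simp [h]
  | succ n ih => simp [List.replicate_succ, ih]

lemma dropWhile_replicate_append {c d : Char} (h : (d == c) = false) (k : Nat) (rest : List Char) :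
    (List.replicate k c ++ d :: rest).dropWhile (· == c) = d :: rest := by
  induction k with
  | zero => simp [h]
  | succ n ih => simp [List.replicate_succ, ih]

-- B computes tri k + tally c k on a list that starts with a maximal run of k copies of c
lemma countRuns_run (rest : List Char) : ∀ (c : Char) (k : Nat), 0 < k →
    countRuns (List.replicate k c ++ rest) = tri k + tally c k rest := by
  induction rest with
  | nil =>
      intro c k hk
      obtain ⟨k', rfl⟩ : ∃ k', k = k' + 1 := ⟨k - 1, by omega⟩
      rw [List.append_nil, List.replicate_succ, countRuns]
      have h1 : (List.replicate k' c).takeWhile (· == c) = List.replicate k' c := by simp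
      have h2 : (List.replicate k' c).dropWhile (· == c) = [] := by simp
      simp only [h1, h2, List.length_replicate, countRuns, tally, add_zero]
      have : ((k' : Int) + 1) = ((k' + 1 : Nat) : Int) := by push_cast; ring
      rw [this, floordiv_tri]
  | cons d rest ih =>
      intro c k hk
      by_cases hd : (d == c) = true
      · have hdc : d = c := by exact eq_of_beq hd
        subst hdc
        have hsh : List.replicate k d ++ d :: rest = List.replicate (k + 1) d ++ rest := by
          rw [List.replicate_succ', List.append_assoc]; rfl
        rw [hsh, ih d (k + 1) (by omega), tri_succ, tally]
        rw [if_pos rfl]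
        ring
      · rw [Bool.not_eq_true] at hd
        obtain ⟨k', rfl⟩ : ∃ k', k = k' + 1 := ⟨k - 1, by omega⟩
        rw [List.replicate_succ, List.cons_append, countRuns,
          takeWhile_replicate_append hd, dropWhile_replicate_append hd]
        have hne : d ≠ c := by simpa using hd
        have htal : tally c (k' + 1) (d :: rest) = 1 + tally d 1 rest := by
          rw [tally, if_neg hne]
        have hcr : countRuns (d :: rest) = tri 1 + tally d 1 rest := by
          have h1 : d :: rest = List.replicate 1 d ++ rest := rfl
          rw [h1, ih d 1 (by omega)]
        rw [htal, hcr, List.length_replicate]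
        have : ((k' : Int) + 1) = ((k' + 1 : Nat) : Int) := by push_cast; ring
        rw [this, floordiv_tri]
        have ht1 : tri 1 = 1 := by decide
        rw [ht1]

-- A's inner while loop drains the k copies of c and stops at the new char d
lemma countShrink_small (cs : List Char) (freq : PySem.Dict Char Int) (left : Int)
    (fuel : Nat) (h : ¬ 1 < freq.size) : countShrink cs freq left fuel = (freq, left) := by
  cases fuel <;> simp [countShrink, h]

lemma countShrink_drain (cs : List Char) : ∀ (k : Nat), 0 < k → ∀ (i fuel : Nat)
    (c d : Char) (rest : List Char), (d == c) = false → k ≤ i → k ≤ fuel →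
    cs.drop (i - k) = List.replicate k c ++ d :: rest →
    countShrink cs (PySem.Dict.mk [(c, (k : Int)), (d, 1)]) ((i : Int) - (k : Int)) fuel
      = (PySem.Dict.mk [(d, 1)], (i : Int)) := by
  intro k
  induction k with
  | zero => omega
  | succ k' ih =>
      intro _ i fuel c d rest hd hki hkf hdrop
      obtain ⟨f', rfl⟩ : ∃ f', fuel = f' + 1 := ⟨fuel - 1, by omega⟩
      have hget : PySem.List.pyGet? cs ((i : Int) - ((k' + 1 : Nat) : Int)) = some c := by
        have hcast : (i : Int) - ((k' + 1 : Nat) : Int) = ((i - (k' + 1) : Nat) : Int) := by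
          push_cast; omega
        rw [hcast, PySem.List.pyGet?_natCast]
        have h0 : (cs.drop (i - (k' + 1)))[0]? = some c := by
          rw [hdrop]; rfl
        rw [List.getElem?_drop] at h0
        simpa using h0
      rw [countShrink, hget]
      simp [PySem.Dict.size, PySem.Dict.modify, PySem.Dict.insert, PySem.Dict.getD,
        PySem.Dict.get?, PySem.Dict.contains, PySem.Dict.erase, hd]
      have hne : d ≠ c := by simpa using hd
      simp only [if_neg hne]
      by_cases hk0 : k' = 0
      · subst hk0
        rw [countShrink_small _ _ _ _ (by simp [PySem.Dict.size, hne])]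
        rw [Prod.mk.injEq]
        refine ⟨by simp [hne], by push_cast; ring⟩
      · have hleft : (i : Int) - ((k' : Int) + 1) + 1 = (i : Int) - (k' : Int) := by ring
        rw [if_neg hk0, hleft]
        have hdrop' : cs.drop (i - k') = List.replicate k' c ++ d :: rest := by
          have hik : i - k' = (i - (k' + 1)) + 1 := by omega
          have ht := congrArg List.tail hdrop
          rw [List.tail_drop] at ht
          rw [hik, ht, List.replicate_succ]
          rfl
        exact ih (by omega) i f' c d rest hd (by omega) (by omega) hdrop'


-- A's outer loop invariant: freq holds the current run, left its start, res the tally so far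
lemma loop_invariant (cs : List Char) : ∀ (suffix : List Char) (i k : Nat) (c : Char) (res : Int),
    0 < k → k ≤ i →
    cs.drop (i - k) = List.replicate k c ++ suffix →
    ((PySem.List.enumerate suffix (i : Int)).foldl (countStep cs)
        (PySem.Dict.mk [(c, (k : Int))], res, (i : Int) - (k : Int))).2.1
      = res + tally c k suffix := by
  intro suffix
  induction suffix with
  | nil => intro i k c res _ _ _; simp [PySem.List.enumerate, tally]
  | cons d rest ih =>
      intro i k c res hk hki hdrop
      rw [PySem.List.enumerate_cons, List.foldl_cons]
      by_cases hbeq : d = c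
      · subst hbeq
        have hstep : countStep cs (PySem.Dict.mk [(d, (k : Int))], res, (i : Int) - (k : Int)) ((i : Int), d)
            = (PySem.Dict.mk [(d, (k : Int) + 1)], res + (k : Int) + 1, (i : Int) - (k : Int)) := by
          simp only [countStep, PySem.Dict.modify, PySem.Dict.insert, PySem.Dict.getD,
            PySem.Dict.get?, PySem.Dict.contains]
          simp
          rw [countShrink_small _ _ _ _ (by simp [PySem.Dict.size])]
          refine ⟨rfl, by ring, rfl⟩
        rw [hstep]
        have hc1 : ((k : Int) + 1) = ((k + 1 : Nat) : Int) := by push_cast; ring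
        have hc2 : (i : Int) - (k : Int) = ((i + 1 : Nat) : Int) - ((k + 1 : Nat) : Int) := by
          push_cast; ring
        have hc3 : ((i : Int)) + 1 = ((i + 1 : Nat) : Int) := by push_cast; ring
        have hdrop' : cs.drop ((i + 1) - (k + 1)) = List.replicate (k + 1) d ++ rest := by
          have h1 : (i + 1) - (k + 1) = i - k := by omega
          have h2 : List.replicate k d ++ d :: rest = List.replicate (k + 1) d ++ rest := by
            rw [List.replicate_succ', List.append_assoc]; rfl
          rw [h1, hdrop, h2]
        rw [hc1, hc2, hc3, ih (i + 1) (k + 1) d (res + (k : Int) + 1) (by omega) (by omega) hdrop']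
        rw [tally, if_pos rfl]
        ring
      · have hd : (d == c) = false := by simpa using hbeq
        have hkcs : k ≤ cs.length := by
          have := congrArg List.length hdrop
          simp [List.length_drop] at this
          omega
        have hstep : countStep cs (PySem.Dict.mk [(c, (k : Int))], res, (i : Int) - (k : Int)) ((i : Int), d)
            = (PySem.Dict.mk [(d, (1 : Int))], res + 1, (i : Int)) := by
          have hf1 : (PySem.Dict.mk [(c, (k : Int))]).modify d 0 (· + 1)
              = PySem.Dict.mk [(c, (k : Int)), (d, 1)] := by
            simp [PySem.Dict.modify, PySem.Dict.insert, PySem.Dict.getD, PySem.Dict.get?,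
              PySem.Dict.contains, (show ¬ c = d from fun h => hbeq h.symm)]
          simp only [countStep, hf1]
          rw [countShrink_drain cs k hk i cs.length c d rest hd hki hkcs hdrop]
          simp only [Prod.mk.injEq]
          refine ⟨trivial, by ring, trivial⟩
        rw [hstep]
        have hdrop'' : cs.drop ((i + 1) - 1) = List.replicate 1 d ++ rest := by
          have h1 : (i + 1) - 1 = (i - k) + k := by omega
          rw [h1, ← List.drop_drop, hdrop]
          simp
        have hIH := ih (i + 1) 1 d (res + 1) (by omega) (by omega) hdrop''
        push_cast at hIH
        have e1 : (i : Int) + 1 - 1 = (i : Int) := by ring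
        rw [e1] at hIH
        rw [hIH, tally, if_neg hbeq]
        ring

-- ===== VERDICT (by name: the statement is the Claim_ definition above) =====
theorem count_spec : Claim_equal_count := by
  intro s _
  unfold Spec_count count count_alt
  cases h : s.toList with
  | nil => simp [PySem.List.enumerate_nil, countRuns]
  | cons c rest =>
      have hstep : countStep (c :: rest) (PySem.Dict.empty, 0, 0) ((0 : Int), c)
          = (PySem.Dict.mk [(c, (1 : Int))], 1, (0 : Int)) := by
        simp only [countStep, PySem.Dict.modify, PySem.Dict.insert, PySem.Dict.getD,
          PySem.Dict.get?, PySem.Dict.contains, PySem.Dict.empty]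
        simp
        rw [countShrink_small _ _ _ _ (by simp [PySem.Dict.size])]
        exact ⟨rfl, rfl⟩
      have hINV := loop_invariant (c :: rest) rest 1 1 c 1 (by omega) (by omega) (by simp)
      push_cast at hINV
      have hrun : countRuns (c :: rest) = tri 1 + tally c 1 rest :=
        countRuns_run rest c 1 (by omega)
      rw [PySem.List.enumerate_cons, List.foldl_cons, hstep]
      norm_num
      rw [hINV, hrun]
      have ht1 : tri 1 = 1 := by decide
      rw [ht1]
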